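-- pv_equiv track=rewrite | github.com/S0S-90/useful_scripts | mathematical_function_collection.py | zahlen_rechts_oben
-- ===== SOURCE A (Python) =====
-- def zahlen_rechts_oben(seitenlaenge):
--     """gibt die Zahlen der Diagonalenhälfte rechts oben aus einer spiralförmigen Zahlenmatrix der Seitenlänge seitenlaenge als Liste aus (ohne 1)"""
--     anzahl = int((seitenlaenge-1)/2)
--     zahl = 1
--     summand = 2
--     zahlen = []
--     for i in range(anzahl):
--         zahl = zahl + summand
--         zahlen.append(zahl)
--         summand = summand + 8
--     return zahlen
-- ===== SOURCE B (Python) =====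
-- def zahlen_rechts_oben(seitenlaenge):
--     """gibt die Zahlen der Diagonalenhälfte rechts oben aus einer spiralförmigen Zahlenmatrix der Seitenlänge seitenlaenge als Liste aus (ohne 1)"""
--     anzahl = int((seitenlaenge - 1) / 2)
--     return [4 * i * i + 6 * i + 3 for i in range(anzahl)]
-- ===== Notes on version B (the rewrite author's own statement) =====
-- stated objective: simpler
-- what changed: Replaced the running zahl/summand accumulator loop by a list comprehension computing each diagonal number independently from a closed-form quadratic in its index.
import Mathlib
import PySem

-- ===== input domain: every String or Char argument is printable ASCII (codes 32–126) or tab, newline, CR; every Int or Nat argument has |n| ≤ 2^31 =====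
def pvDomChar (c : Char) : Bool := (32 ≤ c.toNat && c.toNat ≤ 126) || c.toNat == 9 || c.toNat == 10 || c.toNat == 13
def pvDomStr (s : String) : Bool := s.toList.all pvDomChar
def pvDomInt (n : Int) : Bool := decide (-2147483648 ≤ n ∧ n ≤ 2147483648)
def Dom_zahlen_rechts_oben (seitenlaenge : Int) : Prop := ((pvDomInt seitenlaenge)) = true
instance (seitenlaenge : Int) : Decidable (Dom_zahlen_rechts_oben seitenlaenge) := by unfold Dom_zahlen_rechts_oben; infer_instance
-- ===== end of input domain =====

-- ===== PORT A =====
-- B replaces A's running zahl/summand accumulator by a per-index closed-form quadratic.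
-- int((seitenlaenge-1)/2): exact float halving then truncation toward zero = Int.tdiv on |n| ≤ 2^31.
def zahlen_rechts_oben (seitenlaenge : Int) : List Int :=
  let anzahl : Int := (seitenlaenge - 1).tdiv 2
  let st :=
    (PySem.List.pyRange 0 anzahl 1).foldl
      (fun (st : Int × Int × List Int) _i =>
        let zahl := st.1 + st.2.1
        (zahl, st.2.1 + 8, st.2.2 ++ [zahl]))
      (1, 2, [])
  st.2.2

-- ===== PORT B =====
def zahlen_rechts_oben_alt (seitenlaenge : Int) : List Int :=
  let anzahl : Int := (seitenlaenge - 1).tdiv 2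
  (PySem.List.pyRange 0 anzahl 1).map (fun i => 4 * i * i + 6 * i + 3)

-- ===== PRECONDITION & SPEC =====
def Spec_zahlen_rechts_oben (seitenlaenge : Int) (out : List Int) : Prop := out = zahlen_rechts_oben_alt seitenlaenge
instance (seitenlaenge : Int) (out : List Int) : Decidable (Spec_zahlen_rechts_oben seitenlaenge out) := by unfold Spec_zahlen_rechts_oben; infer_instance

-- ===== CLAIM (what is proved, stated in full; the proofs are below) =====
def Claim_equal_zahlen_rechts_oben : Prop := ∀ (seitenlaenge : Int), Dom_zahlen_rechts_oben seitenlaenge → Spec_zahlen_rechts_oben seitenlaenge (zahlen_rechts_oben seitenlaenge)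

-- ===== LEMMAS AND PROOFS =====

-- ===== VERDICT (by name: the statement is the Claim_ definition above) =====
-- loop invariant of A's fold over range(n): full state after n iterations
theorem pv_loop_state (n : Nat) :
    ((PySem.List.pyRange 0 (n : Int) 1).foldl
      (fun (st : Int × Int × List Int) _i =>
        let zahl := st.1 + st.2.1
        (zahl, st.2.1 + 8, st.2.2 ++ [zahl]))
      ((1, 2, []) : Int × Int × List Int)) =
    ((4 * (n : Int) * n - 2 * n + 1 : Int), (2 + 8 * (n : Int) : Int),
      (PySem.List.pyRange 0 (n : Int) 1).map (fun i => 4 * i * i + 6 * i + 3)) := by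
  induction n with
  | zero => simp
  | succ m ih =>
    have h : ((m : Int) + 1) = (m : Int) + 1 := rfl
    rw [show ((m + 1 : Nat) : Int) = (m : Int) + 1 by push_cast; ring,
        PySem.List.pyRange_one_succ_right (by positivity)]
    simp only [List.foldl_append, List.map_append, ih, List.foldl_cons, List.foldl_nil,
      List.map_cons, List.map_nil]
    refine Prod.ext ?_ (Prod.ext ?_ ?_) <;> simp <;> ring_nf

theorem zahlen_rechts_oben_spec : Claim_equal_zahlen_rechts_oben := by
  intro s _
  unfold Spec_zahlen_rechts_oben zahlen_rechts_oben zahlen_rechts_oben_alt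
  by_cases h : (s - 1).tdiv 2 ≤ 0
  · simp [PySem.List.pyRange_one_eq_nil h]
  · have hn : (s - 1).tdiv 2 = (((s - 1).tdiv 2).toNat : Int) := by omega
    rw [hn]; simp only [pv_loop_state]
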